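-- pv_equiv track=rewrite | github.com/Cago2000/Advent_Of_Code_2024 | Day 09/aoc_9.py | is_defragmented
-- ===== SOURCE A (Python) =====
-- import string
--
-- def is_defragmented(expanded_disk_map: list[string]) -> bool:
--     digit_count = 0
--     for c in expanded_disk_map:
--         if c != ".":
--             digit_count += 1
--     digits_in_row = 0
--     for c in expanded_disk_map:
--         if c == ".": break
--         digits_in_row += 1
--     if digit_count == digits_in_row:
--         return True
--     else:
--         return False
-- ===== SOURCE B (Python) =====
-- def is_defragmented(expanded_disk_map: list) -> bool:
--     idx = next((i for i, c in enumerate(expanded_disk_map) if c == "."), len(expanded_disk_map))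
--     return all(c == "." for c in expanded_disk_map[idx:])
-- ===== Notes on version B (the rewrite author's own statement) =====
-- stated objective: alternative
-- what changed: Instead of A's two full passes that count all non-dot cells and the length of the leading non-dot run and compare the counts, B locates the first '.' and checks that the suffix from there on contains only dots.
import Mathlib
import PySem

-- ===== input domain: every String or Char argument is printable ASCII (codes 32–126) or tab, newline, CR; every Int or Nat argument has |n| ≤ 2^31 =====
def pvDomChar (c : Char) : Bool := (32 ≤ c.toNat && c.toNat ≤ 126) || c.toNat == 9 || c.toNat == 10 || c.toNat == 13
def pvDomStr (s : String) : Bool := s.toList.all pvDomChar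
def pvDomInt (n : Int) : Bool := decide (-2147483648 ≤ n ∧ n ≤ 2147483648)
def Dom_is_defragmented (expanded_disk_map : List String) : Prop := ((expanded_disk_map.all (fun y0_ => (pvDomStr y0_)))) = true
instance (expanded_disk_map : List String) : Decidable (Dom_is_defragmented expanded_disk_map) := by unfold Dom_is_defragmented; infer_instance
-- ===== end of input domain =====

-- B checks "the suffix from the first '.' onward is all dots" instead of A's
-- compare-two-counters; same cost, different decomposition.

-- ===== PORT A =====
-- second loop of A: count leading non-dot cells, stopping at the first '.'
def digitsInRowA : List String → Int
  | [] => 0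
  | c :: t => if c = "." then 0 else 1 + digitsInRowA t

def is_defragmented (expanded_disk_map : List String) : Bool :=
  let digit_count : Int :=
    expanded_disk_map.foldl (fun acc c => if c ≠ "." then acc + 1 else acc) 0
  let digits_in_row : Int := digitsInRowA expanded_disk_map
  if digit_count = digits_in_row then true else false

-- ===== PORT B =====
def is_defragmented_alt (expanded_disk_map : List String) : Bool :=
  let idx := (expanded_disk_map.findIdx? (fun c => c == ".")).getD expanded_disk_map.length
  (expanded_disk_map.drop idx).all (fun c => c == ".")

-- ===== PRECONDITION & SPEC =====
def Spec_is_defragmented (expanded_disk_map : List String) (out : Bool) : Prop := out = is_defragmented_alt expanded_disk_map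
instance (expanded_disk_map : List String) (out : Bool) : Decidable (Spec_is_defragmented expanded_disk_map out) := by unfold Spec_is_defragmented; infer_instance

-- ===== CLAIM (what is proved, stated in full; the proofs are below) =====
def Claim_equal_is_defragmented : Prop := ∀ (expanded_disk_map : List String), Dom_is_defragmented expanded_disk_map → Spec_is_defragmented expanded_disk_map (is_defragmented expanded_disk_map)

-- ===== LEMMAS AND PROOFS =====

def countNonDot (l : List String) : Int :=
  l.foldl (fun acc c => if c ≠ "." then acc + 1 else acc) 0

theorem countNonDot_acc (l : List String) (n : Int) :
    l.foldl (fun acc c => if c ≠ "." then acc + 1 else acc) n = n + countNonDot l := by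
  induction l generalizing n with
  | nil => simp [countNonDot]
  | cons c t ih =>
    simp only [countNonDot, List.foldl_cons]
    rw [ih, ih (if c ≠ "." then (0:Int) + 1 else 0)]
    split_ifs <;> ring

theorem countNonDot_nonneg (l : List String) : 0 ≤ countNonDot l := by
  induction l with
  | nil => simp [countNonDot]
  | cons c t ih =>
    simp only [countNonDot, List.foldl_cons]
    rw [countNonDot_acc]
    split_ifs <;> omega

theorem countNonDot_zero_iff (l : List String) :
    countNonDot l = 0 ↔ l.all (fun c => c == ".") = true := by
  induction l with
  | nil => simp [countNonDot]
  | cons c t ih =>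
    simp only [countNonDot, List.foldl_cons, List.all_cons]
    rw [countNonDot_acc]
    have hn : 0 ≤ countNonDot t := countNonDot_nonneg t
    by_cases hc : c = "."
    · simp [hc, ← ih, countNonDot]
    · simp only [hc, ne_eq, not_false_eq_true, if_pos]
      constructor
      · intro h; omega
      · intro h
        simp only [Bool.and_eq_true, beq_iff_eq] at h
        exact absurd h.1 hc

theorem main_eq (l : List String) : is_defragmented l = is_defragmented_alt l := by
  induction l with
  | nil => decide
  | cons c t ih =>
    by_cases hc : c = "."
    · subst hc
      simp only [is_defragmented, is_defragmented_alt, digitsInRowA]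
      have hf : (("." :: t).findIdx? (fun c => c == ".")).getD ("." :: t).length = 0 := by
        simp [List.findIdx?_cons]
      rw [hf]
      simp only [List.drop_zero, List.all_cons, List.foldl_cons, ne_eq, not_true_eq_false,
        if_false, if_true]
      rw [show (List.foldl (fun acc c => if c ≠ "." then acc + 1 else acc) 0 t) = countNonDot t from rfl]
      by_cases h0 : countNonDot t = 0
      · simp [h0, (countNonDot_zero_iff t).mp h0]
      · have : ¬ t.all (fun c => c == ".") = true := fun h => h0 ((countNonDot_zero_iff t).mpr h)
        simp [h0, this]
    · have hA : is_defragmented (c :: t) = is_defragmented t := by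
        simp only [is_defragmented, digitsInRowA, if_neg hc, List.foldl_cons,
          if_pos (show c ≠ "." from hc), ne_eq]
        rw [countNonDot_acc, show (List.foldl (fun acc c => if c ≠ "." then acc + 1 else acc) (0:Int) t) = countNonDot t from rfl]
        by_cases h : countNonDot t = digitsInRowA t <;> simp [h]
      have hB : is_defragmented_alt (c :: t) = is_defragmented_alt t := by
        simp only [is_defragmented_alt]
        rw [List.findIdx?_cons]
        simp only [beq_iff_eq, hc, ite_false]
        cases hfi : t.findIdx? (fun c => c == ".") with
        | none => simp [List.length_cons]
        | some i =>
          simp [Option.map_some, Option.getD_some, List.drop_succ_cons]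
      rw [hA, hB, ih]

-- ===== VERDICT (by name: the statement is the Claim_ definition above) =====
theorem is_defragmented_spec : Claim_equal_is_defragmented := by
  intro l _
  unfold Spec_is_defragmented
  exact main_eq l
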